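-- pv_equiv track=rewrite | github.com/Mahalinoro/python-algo | coding-challenges/k_prefix.py | solve
-- ===== SOURCE A (Python) =====
-- def solve(nums, k):
--     sums = {}
--     s = 0
--
--     for i in range(len(nums)):
--         s += nums[i]
--         if s <= k:
--             sums[i] = s
--
--     if sums == {}:
--         return -1
--     else:
--         return list(sums.keys())[-1]
-- ===== SOURCE B (Python) =====
-- def solve(nums, k):
--     # Phase 1: build the full prefix-sum table.
--     prefixes = []
--     s = 0
--     for x in nums:
--         s += x
--         prefixes.append(s)
--     # Phase 2: scan the table from the end; first hit is the answer.
--     for i in range(len(prefixes) - 1, -1, -1):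
--         if prefixes[i] <= k:
--             return i
--     return -1
-- ===== Notes on version B (the rewrite author's own statement) =====
-- stated objective: simpler
-- what changed: A fuses accumulation with recording qualifying indices in a dict and finally takes the last dict key; B builds the prefix-sum table first and then scans it from the end, returning the first index whose prefix sum is <= k, with no dict at all.
import Mathlib
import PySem

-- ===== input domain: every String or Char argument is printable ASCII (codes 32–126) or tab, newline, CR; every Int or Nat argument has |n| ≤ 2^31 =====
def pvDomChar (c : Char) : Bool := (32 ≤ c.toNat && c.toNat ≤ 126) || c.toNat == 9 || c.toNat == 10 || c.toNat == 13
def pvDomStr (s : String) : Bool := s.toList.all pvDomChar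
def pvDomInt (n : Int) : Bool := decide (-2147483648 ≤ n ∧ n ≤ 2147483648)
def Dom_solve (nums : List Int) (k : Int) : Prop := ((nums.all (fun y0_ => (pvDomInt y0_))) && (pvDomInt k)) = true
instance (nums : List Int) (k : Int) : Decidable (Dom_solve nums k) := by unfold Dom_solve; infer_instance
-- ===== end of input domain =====

-- B replaces A's fused accumulate-and-record-into-a-dict with a two-phase decomposition (build the
-- prefix-sum table, then scan it back-to-front for the first prefix ≤ k); same cost, no dict needed.

-- ===== PORT A =====
-- 'for i in range(len(nums)): s += nums[i]; if s <= k: sums[i] = s' — the loop walks nums in order,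
-- carrying the index i, the running sum s and the dict.
def solveGo (k : Int) : List Int → Int → Int → PySem.Dict Int Int → PySem.Dict Int Int
  | [], _, _, d => d
  | x :: xs, i, s, d =>
      let s' := s + x
      solveGo k xs (i + 1) s' (if s' ≤ k then d.insert i s' else d)

def solve (nums : List Int) (k : Int) : Int :=
  let d := solveGo k nums 0 0 PySem.Dict.empty
  if d = PySem.Dict.empty then -1
  else PySem.List.pyGetD d.keys (-1) 0   -- list(sums.keys())[-1]; in range since d ≠ {}

-- ===== PORT B =====
-- Phase 1 of Source B: the prefix-sum table ('for x in nums: s += x; prefixes.append(s)').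
def accum : List Int → Int → List Int
  | [], _ => []
  | x :: xs, s => (s + x) :: accum xs (s + x)

-- Phase 2 of Source B: 'for i in range(len(prefixes)-1, -1, -1): if prefixes[i] <= k: return i; return -1'.
def scanRev (prefixes : List Int) (k : Int) : List Int → Int
  | [] => -1
  | i :: is => if PySem.List.pyGetD prefixes i 0 ≤ k then i else scanRev prefixes k is

def solve_alt (nums : List Int) (k : Int) : Int :=
  let prefixes := accum nums 0
  scanRev prefixes k (PySem.List.pyRange ((prefixes.length : Int) - 1) (-1) (-1))

-- ===== PRECONDITION & SPEC =====
def Spec_solve (nums : List Int) (k : Int) (out : Int) : Prop := out = solve_alt nums k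
instance (nums : List Int) (k : Int) (out : Int) : Decidable (Spec_solve nums k out) := by unfold Spec_solve; infer_instance

-- ===== CLAIM (what is proved, stated in full; the proofs are below) =====
def Claim_equal_solve : Prop := ∀ (nums : List Int) (k : Int), Dom_solve nums k → Spec_solve nums k (solve nums k)

-- ===== LEMMAS AND PROOFS =====

-- indices A's loop records, in increasing order
def recIdx (k : Int) : List Int → Int → Int → List Int
  | [], _, _ => []
  | x :: xs, s, i => (if s + x ≤ k then [i] else []) ++ recIdx k xs (s + x) (i + 1)

-- last index (counted from offset i) of the prefix list whose entry is ≤ k, else -1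
def lastLE (k : Int) : List Int → Int → Int
  | [], _ => -1
  | p :: ps, i =>
      let r := lastLE k ps (i + 1)
      if r ≠ -1 then r else if p ≤ k then i else -1

theorem recIdx_ge (k : Int) : ∀ (xs : List Int) (s i : Int) (j : Int), j ∈ recIdx k xs s i → i ≤ j := by
  intro xs
  induction xs with
  | nil => intro s i j h; simp [recIdx] at h
  | cons x xs ih =>
      intro s i j h
      simp only [recIdx, List.mem_append] at h
      rcases h with h | h
      · split at h <;> simp_all
      · have := ih (s + x) (i + 1) j h; omega

theorem solveGo_keys (k : Int) : ∀ (xs : List Int) (i s : Int) (d : PySem.Dict Int Int),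
    (∀ j ∈ d.keys, j < i) → (solveGo k xs i s d).keys = d.keys ++ recIdx k xs s i := by
  intro xs
  induction xs with
  | nil => intro i s d _; simp [solveGo, recIdx]
  | cons x xs ih =>
      intro i s d hd
      simp only [solveGo, recIdx]
      by_cases h : s + x ≤ k
      · simp only [if_pos h]
        have hnc : d.contains i = false := by
          cases hcc : d.contains i
          · rfl
          · exact absurd (hd i ((PySem.Dict.contains_iff_mem_keys d i).mp hcc)) (by omega)
        have hk := PySem.Dict.keys_insert_of_not_contains d (s + x) hnc
        rw [ih (i + 1) (s + x) (d.insert i (s + x)) (by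
          intro j hj; rw [hk] at hj
          rcases List.mem_append.mp hj with hj | hj
          · have := hd j hj; omega
          · simp at hj; omega), hk]
        simp
      · simp only [if_neg h]
        rw [ih (i + 1) (s + x) d (by intro j hj; have := hd j hj; omega)]
        simp

theorem solve_eq_recIdx (nums : List Int) (k : Int) :
    solve nums k = (recIdx k nums 0 0).getLastD (-1) := by
  have hk := solveGo_keys k nums 0 0 PySem.Dict.empty (by simp)
  simp only [PySem.Dict.keys_empty, List.nil_append] at hk
  simp only [solve]
  by_cases he : solveGo k nums 0 0 PySem.Dict.empty = PySem.Dict.empty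
  · rw [if_pos he]
    have : recIdx k nums 0 0 = [] := by rw [← hk, he, PySem.Dict.keys_empty]
    rw [this]; rfl
  · rw [if_neg he]
    have hne : (solveGo k nums 0 0 PySem.Dict.empty).keys ≠ [] := by
      intro h
      apply he
      apply PySem.Dict.ext
      have : (solveGo k nums 0 0 PySem.Dict.empty).items.map (·.1) = [] := h
      simpa [PySem.Dict.empty] using List.map_eq_nil_iff.mp this
    rw [PySem.List.pyGetD_neg_one _ 0 hne]
    have hner : recIdx k nums 0 0 ≠ [] := by rw [← hk]; exact hne
    rw [List.getLastD_eq_getLast?, List.getLast?_eq_some_getLast hner, Option.getD_some]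
    congr 1

theorem lastLE_append_singleton (k p : Int) : ∀ (l : List Int) (i : Int), 0 ≤ i →
    lastLE k (l ++ [p]) i = if p ≤ k then i + l.length else lastLE k l i := by
  intro l
  induction l with
  | nil => intro i hi; simp [lastLE]
  | cons q l ih =>
      intro i hi
      simp only [List.cons_append, lastLE, ih (i + 1) (by omega)]
      by_cases h : p ≤ k
      · have : i + 1 + (l.length : Int) ≠ -1 := by omega
        simp only [if_pos h, ne_eq, this, not_false_eq_true, if_true, List.length_cons]
        push_cast; ring
      · simp [h]

theorem lastLE_eq_recIdx (k : Int) : ∀ (xs : List Int) (s i : Int), 0 ≤ i →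
    lastLE k (accum xs s) i = (recIdx k xs s i).getLastD (-1) := by
  intro xs
  induction xs with
  | nil => intro s i _; simp [accum, recIdx, lastLE]
  | cons x xs ih =>
      intro s i hi
      simp only [accum, recIdx, lastLE, ih (s + x) (i + 1) (by omega)]
      cases hrec : recIdx k xs (s + x) (i + 1) with
      | nil =>
          simp only [List.getLastD_nil, List.append_nil, ne_eq, not_true_eq_false, if_false]
          by_cases h : s + x ≤ k <;> simp [h]
      | cons a l =>
          have hne : (a :: l : List Int) ≠ [] := by simp
          have hge : i + 1 ≤ (a :: l).getLast hne := by
            apply recIdx_ge k xs (s + x) (i + 1)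
            rw [hrec]; exact List.getLast_mem hne
          have hlast : (a :: l).getLastD (-1) = (a :: l).getLast hne := by
            rw [List.getLastD_eq_getLast?, List.getLast?_eq_some_getLast hne]; rfl
          have hne1 : (a :: l).getLastD (-1) ≠ -1 := by rw [hlast]; omega
          simp only [ne_eq, hne1, not_false_eq_true, if_true]
          rw [List.getLastD_eq_getLast?, List.getLastD_eq_getLast?,
            List.getLast?_append_of_ne_nil _ hne]

theorem scan_take (k : Int) (ps : List Int) : ∀ (m : Nat), m ≤ ps.length →
    scanRev ps k (PySem.List.pyRange ((m : Int) - 1) (-1) (-1)) = lastLE k (ps.take m) 0 := by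
  intro m
  induction m with
  | zero =>
      intro _
      rw [PySem.List.pyRange_neg_one_eq_nil (by omega)]
      simp [scanRev, lastLE]
  | succ m ih =>
      intro hm
      have hmlt : m < ps.length := by omega
      have hstep : ((m + 1 : Nat) : Int) - 1 = (m : Int) := by push_cast; ring
      rw [hstep, PySem.List.pyRange_neg_one_cons (by omega)]
      simp only [scanRev]
      rw [PySem.List.pyGetD_ofNat ps m 0 hmlt]  -- prefixes[m]
      rw [ih (by omega)]
      rw [List.take_add_one, List.getElem?_eq_getElem hmlt]
      simp only [Option.toList_some]
      rw [lastLE_append_singleton k _ _ 0 (by omega)]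
      have hlen : ((ps.take m).length : Int) = (m : Int) := by
        simp [List.length_take, Nat.min_eq_left (by omega : m ≤ ps.length)]
      rw [hlen]
      by_cases h : ps[m] ≤ k <;> simp [h]

theorem solve_alt_eq (nums : List Int) (k : Int) :
    solve_alt nums k = lastLE k (accum nums 0) 0 := by
  simp only [solve_alt]
  have := scan_take k (accum nums 0) (accum nums 0).length (le_refl _)
  rw [List.take_length] at this
  exact this

-- ===== VERDICT (by name: the statement is the Claim_ definition above) =====
theorem solve_spec : Claim_equal_solve := by
  intro nums k _
  unfold Spec_solve
  rw [solve_eq_recIdx, solve_alt_eq, lastLE_eq_recIdx k nums 0 0 (by omega)]
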